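-- pv_equiv track=rewrite | github.com/AaronVerDow/stroke_width_finder | bin/width.py | find_biggest_change
-- ===== SOURCE A (Python) =====
-- def find_biggest_change(darkness_values):
--     """Find the biggest change in darkness values"""
--     if len(darkness_values) < 2:
--         return 0, 0
--
--     max_change = 0
--     max_change_index = 0
--
--     for i in range(1, len(darkness_values)):
--         change = abs(darkness_values[i] - darkness_values[i - 1])
--         if change > max_change:
--             max_change = change
--             max_change_index = i
--
--     return max_change_index, max_change
-- ===== SOURCE B (Python) =====
-- def find_biggest_change(darkness_values):
--     """Find the biggest change in darkness values"""
--     if len(darkness_values) < 2: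
--         return 0, 0
--     changes = [0] + [abs(b - a) for a, b in zip(darkness_values, darkness_values[1:])]
--     m = max(changes)
--     return changes.index(m), m
-- ===== Notes on version B (the rewrite author's own statement) =====
-- stated objective: alternative
-- what changed: Replaces the index-based running-max loop with a declarative pipeline: build the adjacent-difference table via zip with a leading zero sentinel, then take max() and its first index with list.index(); the sentinel reproduces A's result when no difference is positive and its first-max tie-breaking.
import Mathlib
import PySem

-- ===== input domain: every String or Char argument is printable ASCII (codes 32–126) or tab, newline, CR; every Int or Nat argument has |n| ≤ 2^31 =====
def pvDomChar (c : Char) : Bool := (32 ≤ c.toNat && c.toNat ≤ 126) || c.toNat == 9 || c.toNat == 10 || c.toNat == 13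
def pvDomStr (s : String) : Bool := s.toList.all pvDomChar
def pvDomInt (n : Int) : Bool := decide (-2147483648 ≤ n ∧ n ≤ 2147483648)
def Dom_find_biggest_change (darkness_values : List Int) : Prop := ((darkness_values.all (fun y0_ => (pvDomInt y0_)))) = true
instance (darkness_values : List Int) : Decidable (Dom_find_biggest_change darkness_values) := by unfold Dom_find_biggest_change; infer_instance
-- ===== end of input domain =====

-- B replaces A's index-based running-max loop by a zip-built difference table with a 0 sentinel, then max() + first index (alternative decomposition, same cost).


-- ===== PORT A =====
-- for i in range(1, len): change = abs(dv[i] - dv[i-1]); update (max_change_index, max_change) on strict improvement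
def find_biggest_change (darkness_values : List Int) : Int × Int :=
  if PySem.List.len darkness_values < 2 then (0, 0)
  else
    (PySem.List.pyRange 1 (PySem.List.len darkness_values) 1).foldl
      (fun s i =>
        let change := |PySem.List.pyGetD darkness_values i 0 - PySem.List.pyGetD darkness_values (i - 1) 0|
        if change > s.2 then (i, change) else s)
      (0, 0)

-- ===== PORT B =====
-- changes = [0] + [abs(b - a) for a, b in zip(dv, dv[1:])]; m = max(changes); return changes.index(m), m
-- (dv[1:] is dv.drop 1 — exact for this nonneg literal slice; zip truncates to the shorter list in both languages)
def find_biggest_change_alt (darkness_values : List Int) : Int × Int :=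
  if PySem.List.len darkness_values < 2 then (0, 0)
  else
    let changes : List Int :=
      0 :: (darkness_values.zip (darkness_values.drop 1)).map (fun p => |p.2 - p.1|)
    let m : Int := (PySem.List.max? changes (fun y => y)).getD 0
    ((((PySem.List.index? changes m).getD 0 : Nat) : Int), m)

-- ===== PRECONDITION & SPEC =====
def Spec_find_biggest_change (darkness_values : List Int) (out : Int × Int) : Prop := out = find_biggest_change_alt darkness_values
instance (darkness_values : List Int) (out : Int × Int) : Decidable (Spec_find_biggest_change darkness_values out) := by unfold Spec_find_biggest_change; infer_instance

-- ===== CLAIM (what is proved, stated in full; the proofs are below) =====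
def Claim_equal_find_biggest_change : Prop := ∀ (darkness_values : List Int), Dom_find_biggest_change darkness_values → Spec_find_biggest_change darkness_values (find_biggest_change darkness_values)

-- ===== LEMMAS AND PROOFS =====

-- A's loop, abstracted over the list of successive differences, with the running index i.
def pvLoop (idx mx i : Int) : List Int → Int × Int
  | [] => (idx, mx)
  | d :: ds => if d > mx then pvLoop i d (i + 1) ds else pvLoop idx mx (i + 1) ds

theorem pvFoldl_max_eq_or_mem (l : List Int) (a : Int) :
    l.foldl max a = a ∨ l.foldl max a ∈ l := by
  induction l generalizing a with
  | nil => exact Or.inl rfl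
  | cons d ds ih =>
    rcases ih (max a d) with h | h
    · rcases max_choice a d with h' | h' <;> rw [List.foldl_cons, h, h']
      · exact Or.inl rfl
      · exact Or.inr (List.mem_cons_self)
    · exact Or.inr (List.mem_cons_of_mem _ h)

-- characterisation of A's loop: it returns the running max and (offset by i) the first index achieving it
theorem pvLoop_eq (ds : List Int) : ∀ (i idx mx : Int),
    pvLoop idx mx i ds =
      if ds.foldl max mx ≤ mx then (idx, mx)
      else (i + (((PySem.List.index? ds (ds.foldl max mx)).getD 0 : Nat) : Int), ds.foldl max mx) := by
  induction ds with
  | nil => intro i idx mx; simp [pvLoop]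
  | cons d ds ih =>
    intro i idx mx
    rw [pvLoop, List.foldl_cons]
    by_cases hdm : d > mx
    · rw [if_pos hdm, ih]
      have hmax : max mx d = d := max_eq_right (le_of_lt hdm)
      rw [hmax]
      have hle : d ≤ ds.foldl max d := (PySem.List.le_foldl_max ds d).1
      by_cases h1 : ds.foldl max d ≤ d
      · have heq : ds.foldl max d = d := le_antisymm h1 hle
        rw [if_pos h1, if_neg (by omega), heq, PySem.List.index?_cons_self]
        simp
      · have hne : d ≠ ds.foldl max d := by omega
        have hmem : ds.foldl max d ∈ ds := by
          rcases pvFoldl_max_eq_or_mem ds d with h | h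
          · omega
          · exact h
        rw [if_neg h1, if_neg (by omega), PySem.List.index?_cons_of_ne _ hne]
        obtain ⟨k, hk⟩ := Option.isSome_iff_exists.mp
          ((PySem.List.index?_isSome_iff ds (ds.foldl max d)).mpr hmem)
        rw [hk]
        simp only [Option.map_some, Option.getD_some, Prod.mk.injEq]
        refine ⟨by push_cast; ring, trivial⟩
    · rw [if_neg hdm, ih]
      have hmax : max mx d = mx := max_eq_left (by omega)
      rw [hmax]
      by_cases h1 : ds.foldl max mx ≤ mx
      · rw [if_pos h1, if_pos h1]
      · have hne : d ≠ ds.foldl max mx := by omega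
        have hmem : ds.foldl max mx ∈ ds := by
          rcases pvFoldl_max_eq_or_mem ds mx with h | h
          · omega
          · exact h
        rw [if_neg h1, if_neg h1, PySem.List.index?_cons_of_ne _ hne]
        obtain ⟨k, hk⟩ := Option.isSome_iff_exists.mp
          ((PySem.List.index?_isSome_iff ds (ds.foldl max mx)).mpr hmem)
        rw [hk]
        simp only [Option.map_some, Option.getD_some, Prod.mk.injEq]
        refine ⟨by push_cast; ring, trivial⟩

-- A's foldl over range(a, a+n) with body f equals pvLoop over the mapped difference list
theorem pvFoldl_range_eq_pvLoop (f : Int → Int) : ∀ (n : Nat) (a idx mx : Int),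
    (PySem.List.pyRange a (a + n) 1).foldl
        (fun s i => if f i > s.2 then (i, f i) else s) (idx, mx)
      = pvLoop idx mx a ((PySem.List.pyRange a (a + n) 1).map f) := by
  intro n
  induction n with
  | zero =>
    intro a idx mx
    rw [PySem.List.pyRange_one_eq_nil (by omega)]
    simp [pvLoop]
  | succ n ih =>
    intro a idx mx
    have hcons := PySem.List.pyRange_one_cons (a := a) (b := a + (n + 1 : Nat)) (by push_cast; omega)
    have harg : a + ((n + 1 : Nat) : Int) = (a + 1) + (n : Nat) := by push_cast; ring
    rw [hcons, harg, List.foldl_cons, List.map_cons, pvLoop]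
    by_cases h : f a > mx
    · rw [if_pos h, if_pos h]; exact ih (a + 1) a (f a)
    · rw [if_neg h, if_neg h]; exact ih (a + 1) idx mx

-- the comprehension over range(1, len dv) computes the same list as B's zip comprehension
theorem pvDiffs_eq (dv : List Int) :
    (PySem.List.pyRange 1 (PySem.List.len dv) 1).map
        (fun i => |PySem.List.pyGetD dv i 0 - PySem.List.pyGetD dv (i - 1) 0|)
      = (dv.zip (dv.drop 1)).map (fun p => |p.2 - p.1|) := by
  apply List.ext_getElem
  · simp [PySem.List.length_pyRange_one, PySem.List.len]
  · intro k h1 h2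
    have hk : k < dv.length - 1 := by
      simpa [PySem.List.length_pyRange_one, PySem.List.len] using h1
    have hkr : k < (PySem.List.pyRange 1 (PySem.List.len dv) 1).length := by
      simpa using h1
    rw [List.getElem_map, List.getElem_map, PySem.List.getElem_pyRange_one _ _ _ hkr]
    have hg1 : PySem.List.pyGetD dv (1 + (k : Int)) 0 = dv[(1 + (k : Int)).toNat] := by
      apply PySem.List.pyGetD_eq_getElem dv 0 (by omega) (by push_cast; omega)
    have hg2 : PySem.List.pyGetD dv (1 + (k : Int) - 1) 0 = dv[(1 + (k : Int) - 1).toNat] := by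
      apply PySem.List.pyGetD_eq_getElem dv 0 (by omega) (by push_cast; omega)
    have ht1 : (1 + (k : Int)).toNat = k + 1 := by omega
    have ht2 : (1 + (k : Int) - 1).toNat = k := by omega
    rw [hg1, hg2]
    simp only [ht1, ht2, List.getElem_zip, List.getElem_drop,
      show 1 + k = k + 1 from Nat.add_comm 1 k]

-- ===== VERDICT (by name: the statement is the Claim_ definition above) =====
theorem find_biggest_change_spec : Claim_equal_find_biggest_change := by
  intro dv _
  unfold Spec_find_biggest_change find_biggest_change find_biggest_change_alt
  by_cases hlen : PySem.List.len dv < 2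
  · rw [if_pos hlen, if_pos hlen]
  · rw [if_neg hlen, if_neg hlen]
    have hlen2 : 2 ≤ dv.length := by
      simp only [PySem.List.len] at hlen; omega
    obtain ⟨n, hn⟩ : ∃ n, dv.length = n + 2 := ⟨dv.length - 2, by omega⟩
    have hsplit : PySem.List.len dv = (1 : Int) + ((n + 1 : Nat) : Int) := by
      simp [PySem.List.len, hn]; ring
    set f : Int → Int := fun i => |PySem.List.pyGetD dv i 0 - PySem.List.pyGetD dv (i - 1) 0| with hf
    have hA : (PySem.List.pyRange 1 (PySem.List.len dv) 1).foldl
        (fun s i => if f i > s.2 then (i, f i) else s) ((0 : Int), (0 : Int))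
        = pvLoop 0 0 1 ((PySem.List.pyRange 1 (PySem.List.len dv) 1).map f) := by
      rw [hsplit]; exact pvFoldl_range_eq_pvLoop f (n + 1) 1 0 0
    have hdiffs := pvDiffs_eq dv
    set zs : List Int := (dv.zip (dv.drop 1)).map (fun p => |p.2 - p.1|) with hzs
    rw [hA, hdiffs, pvLoop_eq]
    show _ = ((((PySem.List.index? (0 :: zs) ((PySem.List.max? (0 :: zs) (fun y => y)).getD 0)).getD 0 : Nat) : Int),
      (PySem.List.max? (0 :: zs) (fun y => y)).getD 0)
    have hmB : (PySem.List.max? (0 :: zs) (fun y => y)).getD 0 = zs.foldl max 0 := by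
      rw [PySem.List.max?_id_cons]; rfl
    rw [hmB]
    have h0le : (0 : Int) ≤ zs.foldl max 0 := (PySem.List.le_foldl_max zs 0).1
    by_cases hm : zs.foldl max 0 ≤ 0
    · have hm0 : zs.foldl max 0 = 0 := le_antisymm hm h0le
      rw [if_pos hm, hm0, PySem.List.index?_cons_self]
      rfl
    · have hne : (0 : Int) ≠ zs.foldl max 0 := by omega
      rw [if_neg hm, PySem.List.index?_cons_of_ne _ hne]
      have hmem : zs.foldl max 0 ∈ zs := by
        rcases pvFoldl_max_eq_or_mem zs 0 with h | h
        · omega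
        · exact h
      obtain ⟨k, hk⟩ := Option.isSome_iff_exists.mp
        ((PySem.List.index?_isSome_iff zs (zs.foldl max 0)).mpr hmem)
      rw [hk]
      simp only [Option.map_some, Option.getD_some, Prod.mk.injEq]
      refine ⟨by push_cast; ring, trivial⟩
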